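-- pv_equiv track=rewrite | github.com/limitz/glitchkin | output/tools/LTG_TOOL_proportion_verify.py | find_head_height
-- ===== SOURCE A (Python) =====
-- HEAD_GAP_ROWS     = 4       # a gap of at least this many empty rows separates head from neck
--
-- def find_head_height(occ, top_row):
--     """
--     Starting from top_row, find the first gap of >= HEAD_GAP_ROWS consecutive
--     empty rows.  The head occupies rows [top_row, gap_start_row).
--     Returns head_height (pixels) and a string describing the method used.
--     """
--     H = len(occ)
--     consecutive_empty = 0
--     gap_start = None
--     for y in range(top_row, H):
--         if not occ[y]:
--             if consecutive_empty == 0: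
--                 gap_start = y
--             consecutive_empty += 1
--             if consecutive_empty >= HEAD_GAP_ROWS:
--                 # gap_start is the first empty row of the gap
--                 return gap_start - top_row, "gap-detection"
--         else:
--             consecutive_empty = 0
--             gap_start = None
--     # No clear gap found — fall back
--     return None, "no-gap"
-- ===== SOURCE B (Python) =====
-- HEAD_GAP_ROWS = 4       # a gap of at least this many empty rows separates head from neck
--
-- def find_head_height(occ, top_row):
--     """Scan maximal runs of equal emptiness below top_row; the first empty run
--     of length >= HEAD_GAP_ROWS starts the gap."""
--     rows = occ[top_row:]
--     offset = 0
--     while rows: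
--         run = 1
--         while run < len(rows) and rows[run] == rows[0]:
--             run += 1
--         if not rows[0] and run >= HEAD_GAP_ROWS:
--             return offset, "gap-detection"
--         offset += run
--         rows = rows[run:]
--     return None, "no-gap"
-- ===== Notes on version B (the rewrite author's own statement) =====
-- stated objective: alternative
-- what changed: B slices occ[top_row:] and walks maximal runs of equal emptiness (inner while counting each run, skipping it whole), returning the offset at the start of the first empty run of length >= 4, instead of A's per-row loop with a consecutive-empty counter and gap_start register.
-- outside the precondition, e.g. on find_head_height([False, False, False, False], -1): A returns (0, 'gap-detection'), B returns (None, 'no-gap')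
import Mathlib
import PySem

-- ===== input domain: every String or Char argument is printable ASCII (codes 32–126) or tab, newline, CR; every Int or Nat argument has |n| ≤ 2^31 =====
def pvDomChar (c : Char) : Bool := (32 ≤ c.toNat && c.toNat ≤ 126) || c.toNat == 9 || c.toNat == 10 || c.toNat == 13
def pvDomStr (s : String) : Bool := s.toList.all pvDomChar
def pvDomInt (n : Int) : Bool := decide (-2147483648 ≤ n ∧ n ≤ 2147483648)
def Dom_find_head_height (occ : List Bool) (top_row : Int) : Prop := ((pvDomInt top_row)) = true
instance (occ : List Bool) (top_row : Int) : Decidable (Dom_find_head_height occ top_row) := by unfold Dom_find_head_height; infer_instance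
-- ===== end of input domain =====

-- B scans maximal runs of equal emptiness over the slice occ[top_row:] instead of A's
-- per-row consecutive-empty counter; alternative decomposition, same asymptotic cost.

-- ===== PORT A =====
-- loop 'for y in range(top_row, H)' with state (consecutive_empty, gap_start);
-- the 'none' arm of pyGet? is Python's IndexError (excluded by Pre_).
def find_head_height_goA (occ : List Bool) (top_row : Int) :
    Int → Option Int → List Int → Option Int × String
  | _, _, [] => (none, "no-gap")
  | ce, gs, y :: ys =>
    match PySem.List.pyGet? occ y with
    | none => (none, "no-gap")   -- IndexError; unreachable inside Pre_
    | some b =>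
      if b = false then
        let gs' := if ce = 0 then some y else gs
        let ce' := ce + 1
        if ce' ≥ 4 then (some (gs'.getD 0 - top_row), "gap-detection")
        else find_head_height_goA occ top_row ce' gs' ys
      else find_head_height_goA occ top_row 0 none ys

def find_head_height (occ : List Bool) (top_row : Int) : Option Int × String :=
  find_head_height_goA occ top_row 0 none (PySem.List.pyRange top_row (occ.length : Int) 1)

-- ===== PORT B =====
-- 'while run < len(rows) and rows[run] == rows[0]' counts the rest of the head run
def find_head_height_runLen (v : Bool) : List Bool → Nat
  | [] => 0
  | b :: bs => if b = v then 1 + find_head_height_runLen v bs else 0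

-- outer 'while rows:' loop over maximal runs
def find_head_height_goB : List Bool → Int → Option Int × String
  | [], _ => (none, "no-gap")
  | b :: bs, offset =>
    let run : Nat := 1 + find_head_height_runLen b bs
    if b = false ∧ run ≥ 4 then (some offset, "gap-detection")
    else find_head_height_goB (bs.drop (run - 1)) (offset + run)
termination_by rows => rows.length
decreasing_by simp

def find_head_height_alt (occ : List Bool) (top_row : Int) : Option Int × String :=
  find_head_height_goB (PySem.List.slice occ (some top_row) none) 0

-- ===== PRECONDITION & SPEC =====
-- Pre_ restricts top_row to the natural domain of a row index: for negative top_row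
-- A either raises IndexError (top_row < -len(occ)) or rescans rows via Python's
-- negative-index wraparound, which is outside the task's natural domain.
def Pre_find_head_height (occ : List Bool) (top_row : Int) : Prop := 0 ≤ top_row
instance (occ : List Bool) (top_row : Int) : Decidable (Pre_find_head_height occ top_row) := by unfold Pre_find_head_height; infer_instance
def pvWitness_find_head_height : List Bool × Int := ([true, false, false, false, false], 0)

def Spec_find_head_height (occ : List Bool) (top_row : Int) (out : Option Int × String) : Prop := out = find_head_height_alt occ top_row
instance (occ : List Bool) (top_row : Int) (out : Option Int × String) : Decidable (Spec_find_head_height occ top_row out) := by unfold Spec_find_head_height; infer_instance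

-- ===== CLAIM (what is proved, stated in full; the proofs are below) =====
def Claim_equal_find_head_height : Prop := ∀ (occ : List Bool) (top_row : Int), Dom_find_head_height occ top_row → Pre_find_head_height occ top_row → Spec_find_head_height occ top_row (find_head_height occ top_row)

-- ===== LEMMAS AND PROOFS =====

-- middle spec: A's loop phrased over the list of remaining row values (y = absolute index)
def scanSpec (top_row : Int) : List Bool → Int → Int → Option Int → Option Int × String
  | [], _, _, _ => (none, "no-gap")
  | b :: bs, y, ce, gs =>
    if b = false then
      let gs' := if ce = 0 then some y else gs
      let ce' := ce + 1
      if ce' ≥ 4 then (some (gs'.getD 0 - top_row), "gap-detection")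
      else scanSpec top_row bs (y + 1) ce' gs'
    else scanSpec top_row bs (y + 1) 0 none

theorem goA_eq_scanSpec (occ : List Bool) (t : Int) :
    ∀ (k : Nat) (ce : Int) (gs : Option Int), k ≤ occ.length →
      find_head_height_goA occ t ce gs (PySem.List.pyRange (k : Int) (occ.length : Int) 1)
        = scanSpec t (occ.drop k) (k : Int) ce gs := by
  intro k
  induction hk : occ.length - k generalizing k with
  | zero =>
    intro ce gs hle
    have hk' : k = occ.length := by omega
    subst hk'
    simp [PySem.List.pyRange, scanSpec, find_head_height_goA]
  | succ n ih =>
    intro ce gs hle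
    have hlt : k < occ.length := by omega
    rw [PySem.List.pyRange_one_cons (by exact_mod_cast hlt)]
    have hdrop : occ.drop k = occ[k] :: occ.drop (k + 1) := List.drop_eq_getElem_cons hlt
    have hget : PySem.List.pyGet? occ (k : Int) = some occ[k] := by
      simp [PySem.List.pyGet?, PySem.List.pyIdx?, hlt]
    have hstep : ((k : Int) + 1) = ((k + 1 : Nat) : Int) := by push_cast; ring
    cases hb : occ[k] with
    | false =>
      rw [hb] at hget hdrop
      rw [hdrop]
      simp only [find_head_height_goA, hget, scanSpec, if_true]
      by_cases h4 : ce + 1 ≥ 4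
      · simp [h4]
      · rw [if_neg h4, if_neg h4, hstep]
        exact ih (k + 1) (by omega) _ _ (by omega)
    | true =>
      rw [hb] at hget hdrop
      rw [hdrop]
      simp only [find_head_height_goA, hget, scanSpec, if_neg (by simp : ¬ (true = false))]
      rw [hstep]
      exact ih (k + 1) (by omega) 0 none (by omega)

-- runLen characterisation: the drop after a maximal run does not start with the same value
theorem runLen_le_length (v : Bool) (L : List Bool) : find_head_height_runLen v L ≤ L.length := by
  induction L with
  | nil => simp [find_head_height_runLen]
  | cons b bs ih =>
    by_cases h : b = v
    · simp [find_head_height_runLen, h]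
      omega
    · simp [find_head_height_runLen, h]

theorem drop_runLen_head (v : Bool) (L : List Bool) :
    L.drop (find_head_height_runLen v L) = [] ∨
    ∃ bs, L.drop (find_head_height_runLen v L) = (!v) :: bs := by
  induction L with
  | nil => left; simp
  | cons b bs ih =>
    by_cases h : b = v
    · subst h
      simpa [find_head_height_runLen, Nat.add_comm] using ih
    · right
      refine ⟨bs, ?_⟩
      have : b = !v := by cases v <;> cases b <;> simp_all
      simp [find_head_height_runLen, this]

-- B skips a leading run of 'true' in one step
theorem goB_skip_true (bs : List Bool) (o : Int) :
    find_head_height_goB bs o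
      = find_head_height_goB (bs.drop (find_head_height_runLen true bs))
          (o + (find_head_height_runLen true bs : Int)) := by
  cases bs with
  | nil => simp [find_head_height_runLen]
  | cons b bs' =>
    cases b with
    | false => simp [find_head_height_runLen]
    | true =>
      have h1 : find_head_height_runLen true (true :: bs')
          = 1 + find_head_height_runLen true bs' := by simp [find_head_height_runLen]
      rw [h1, find_head_height_goB]
      rw [if_neg (by simp : ¬ (true = false ∧ 1 + find_head_height_runLen true bs' ≥ 4))]
      have hd : (true :: bs').drop (1 + find_head_height_runLen true bs')
          = bs'.drop (1 + find_head_height_runLen true bs' - 1) := by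
        rw [Nat.add_comm]
        simp
      rw [hd]

-- A inside an empty run with counter ce (1 ≤ ce ≤ 3) and recorded start g
theorem scanSpec_false_run (t : Int) (L : List Bool) :
    ∀ (ce : Int) (g : Int) (y : Int), 1 ≤ ce → ce ≤ 3 →
      scanSpec t L y ce (some g)
        = if ce + (find_head_height_runLen false L : Int) ≥ 4 then
            (some (g - t), "gap-detection")
          else
            match L.drop (find_head_height_runLen false L) with
            | [] => (none, "no-gap")
            | _ :: rest => scanSpec t rest (y + (find_head_height_runLen false L : Int) + 1) 0 none := by
  induction L with
  | nil =>
    intro ce g y h1 h3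
    rw [if_neg (by simp [find_head_height_runLen]; omega)]
    simp [scanSpec, find_head_height_runLen]
  | cons b bs ih =>
    intro ce g y h1 h3
    cases b with
    | false =>
      have hrl : find_head_height_runLen false (false :: bs)
          = 1 + find_head_height_runLen false bs := by simp [find_head_height_runLen]
      rw [hrl]
      simp only [scanSpec, if_true]
      have hce0 : ¬ ce = 0 := by omega
      rw [if_neg hce0]
      by_cases h4 : ce + 1 ≥ 4
      · rw [if_pos h4]
        rw [if_pos (show ce + ((1 + find_head_height_runLen false bs : Nat) : Int) ≥ 4 by
          push_cast; omega)]
        simp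
      · rw [if_neg h4, ih (ce + 1) g (y + 1) (by omega) (by omega)]
        have hdq : (false :: bs).drop (1 + find_head_height_runLen false bs)
            = bs.drop (find_head_height_runLen false bs) := by
          rw [Nat.add_comm]
          simp
        rw [hdq]
        by_cases hq : ce + 1 + (find_head_height_runLen false bs : Int) ≥ 4
        · rw [if_pos hq]
          rw [if_pos (show ce + ((1 + find_head_height_runLen false bs : Nat) : Int) ≥ 4 by
            push_cast at hq ⊢; omega)]
        · rw [if_neg hq]
          rw [if_neg (show ¬ ce + ((1 + find_head_height_runLen false bs : Nat) : Int) ≥ 4 by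
            push_cast at hq ⊢; omega)]
          cases hcase : bs.drop (find_head_height_runLen false bs) with
          | nil => rfl
          | cons c rest =>
            have hy : y + 1 + ((find_head_height_runLen false bs : Nat) : Int) + 1
                = y + ((1 + find_head_height_runLen false bs : Nat) : Int) + 1 := by
              push_cast; ring
            rw [hy]
    | true =>
      have hrl : find_head_height_runLen false (true :: bs) = 0 := by
        simp [find_head_height_runLen]
      rw [hrl]
      rw [if_neg (show ¬ ce + ((0 : Nat) : Int) ≥ 4 by push_cast; omega)]
      simp [scanSpec]

-- main bridge: A's scan with fresh state = B's run loop
theorem scanSpec_eq_goB (t : Int) :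
    ∀ (L : List Bool) (y : Int),
      scanSpec t L y 0 none = find_head_height_goB L (y - t) := by
  intro L
  induction hn : L.length using Nat.strong_induction_on generalizing L with
  | _ n ih =>
    intro y
    cases L with
    | nil => simp [scanSpec, find_head_height_goB]
    | cons b bs =>
      cases b with
      | true =>
        simp only [scanSpec]
        rw [ih (bs.length) (by simp [← hn]) bs rfl (y + 1)]
        rw [find_head_height_goB]
        rw [if_neg (by simp)]
        rw [goB_skip_true bs (y + 1 - t)]
        congr 1
        · simp [Nat.add_comm]
        · push_cast; ring
      | false =>
        simp only [scanSpec, if_true, zero_add]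
        rw [if_neg (show ¬ ((1 : Int) ≥ 4) by omega)]
        rw [scanSpec_false_run t bs 1 y (y + 1) (by omega) (by omega)]
        rw [find_head_height_goB]
        set r := find_head_height_runLen false bs with hr
        by_cases h4 : (1 : Int) + (r : Int) ≥ 4
        · rw [if_pos h4, if_pos ⟨rfl, by omega⟩]
        · rw [if_neg h4, if_neg (by intro h; omega)]
          have hdrop : bs.drop (1 + r - 1) = bs.drop r := by congr 1; omega
          rw [hdrop]
          cases hcase : bs.drop r with
          | nil => simp [find_head_height_goB]
          | cons c rest =>
            have hc : c = true := by
              rcases drop_runLen_head false bs with h | ⟨bs', h⟩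
              · rw [← hr] at h; rw [h] at hcase; cases hcase
              · rw [← hr] at h; rw [h] at hcase
                injection hcase with h1 _; simp [← h1]
            subst hc
            have hlen : rest.length < n := by
              have := runLen_le_length false bs
              have h2 : (bs.drop r).length = bs.length - r := by simp
              rw [hcase] at h2
              simp at h2
              simp [← hn]
              omega
            have hred : (match (true :: rest : List Bool) with
                | [] => ((none : Option Int), "no-gap")
                | _ :: rest' => scanSpec t rest' (y + 1 + (r : Int) + 1) 0 none)
                = scanSpec t rest (y + 1 + (r : Int) + 1) 0 none := rfl
            rw [hred, ih rest.length hlen rest rfl (y + 1 + (r : Int) + 1)]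
            rw [find_head_height_goB]
            rw [if_neg (show ¬ (true = false ∧ 1 + find_head_height_runLen true rest ≥ 4) from by simp)]
            rw [goB_skip_true rest (y + 1 + (r : Int) + 1 - t)]
            congr 1
            · congr 1
              omega
            · push_cast
              ring

-- ===== VERDICT (by name: the statement is the Claim_ definition above) =====
theorem find_head_height_spec : Claim_equal_find_head_height := by
  intro occ top_row _ hpre
  unfold Spec_find_head_height find_head_height find_head_height_alt
  obtain ⟨k, hk⟩ : ∃ k : Nat, top_row = (k : Int) := ⟨top_row.toNat, (Int.toNat_of_nonneg hpre).symm⟩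
  subst hk
  rw [PySem.List.slice_from_natCast]
  by_cases hle : k ≤ occ.length
  · rw [goA_eq_scanSpec occ (k : Int) k 0 none hle, scanSpec_eq_goB]
    simp
  · have h1 : PySem.List.pyRange (k : Int) (occ.length : Int) 1 = [] := by
      simp [PySem.List.pyRange]; omega
    have h2 : occ.drop k = [] := List.drop_eq_nil_of_le (by omega)
    rw [h1, h2]
    simp [find_head_height_goA, find_head_height_goB]
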